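-- pv_equiv track=rewrite | github.com/ITrackU/telcom-tech-plot | ethernet_encode/10_GB_ethernet_64b66b_encoding.py | chunk_bits
-- ===== SOURCE A (Python) =====
-- def chunk_bits(bits, size=64):
--     """Chunk bitstream into size-bit blocks, pad last block with zeros."""
--     chunks = []
--     for i in range(0, len(bits), size):
--         chunk = bits[i:i+size]
--         if len(chunk) < size:
--             chunk += [0] * (size - len(chunk))
--         chunks.append(chunk)
--     return chunks
-- ===== SOURCE B (Python) =====
-- def chunk_bits(bits, size=64):
--     """Chunk bitstream into size-bit blocks, pad last block with zeros."""
--     chunks = []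
--     cur = []
--     for b in bits:
--         cur.append(b)
--         if len(cur) == size:
--             chunks.append(cur)
--             cur = []
--     if cur:
--         chunks.append(cur + [0] * (size - len(cur)))
--     return chunks
-- ===== Notes on version B (the rewrite author's own statement) =====
-- stated objective: alternative
-- what changed: B is a single element-wise pass with an accumulator that flushes a chunk each time it reaches size elements and pads the leftover once, instead of A's index arithmetic with range stepping and slicing.
-- outside the precondition, e.g. on chunk_bits([1], -2): A returns [], B returns [[1]]
import Mathlib
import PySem

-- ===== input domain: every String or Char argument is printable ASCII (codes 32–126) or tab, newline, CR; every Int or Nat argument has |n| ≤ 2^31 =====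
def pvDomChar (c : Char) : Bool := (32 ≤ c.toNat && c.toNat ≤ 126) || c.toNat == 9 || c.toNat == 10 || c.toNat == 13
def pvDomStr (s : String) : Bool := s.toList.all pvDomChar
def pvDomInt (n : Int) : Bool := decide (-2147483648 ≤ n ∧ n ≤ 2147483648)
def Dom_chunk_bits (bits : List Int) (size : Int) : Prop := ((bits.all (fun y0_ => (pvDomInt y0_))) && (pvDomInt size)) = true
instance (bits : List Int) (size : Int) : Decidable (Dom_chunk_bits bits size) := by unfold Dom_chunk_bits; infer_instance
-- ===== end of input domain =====

-- B builds chunks in one element-wise pass with an accumulator (flush on full, pad leftover once),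
-- instead of A's range-stepping index loop with slicing; return values agree on Pre_ (size ≥ 1).

-- ===== PORT A =====
-- literal transliteration of A: loop over range(0, len(bits), size), slice, pad a short chunk
def chunk_bits (bits : List Int) (size : Int) : List (List Int) :=
  (PySem.List.pyRange 0 (bits.length : Int) size).foldl
    (fun chunks i =>
      let chunk := PySem.List.slice bits (some i) (some (i + size))
      let chunk := if (chunk.length : Int) < size
        then chunk ++ List.replicate (size - (chunk.length : Int)).toNat 0
        else chunk
      chunks ++ [chunk]) []

-- ===== PORT B =====
-- literal transliteration of Source B: one pass, append to cur, flush when len(cur) == size, pad leftover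
def chunk_bits_alt (bits : List Int) (size : Int) : List (List Int) :=
  let st := bits.foldl
    (fun (st : List (List Int) × List Int) b =>
      let cur := st.2 ++ [b]
      if (cur.length : Int) = size then (st.1 ++ [cur], ([] : List Int)) else (st.1, cur))
    ([], [])
  if st.2 ≠ [] then st.1 ++ [st.2 ++ List.replicate (size - (st.2.length : Int)).toNat 0] else st.1

-- ===== PRECONDITION & SPEC =====
-- Pre_ restricts to the natural domain size ≥ 1: Python A raises ValueError on size = 0
-- (range step 0), and negative size lies outside the task's natural domain (see claim cites).
def Pre_chunk_bits (bits : List Int) (size : Int) : Prop := 1 ≤ size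
instance (bits : List Int) (size : Int) : Decidable (Pre_chunk_bits bits size) := by unfold Pre_chunk_bits; infer_instance
def pvWitness_chunk_bits : List Int × Int := ([1, 0, 1], 2)

def Spec_chunk_bits (bits : List Int) (size : Int) (out : List (List Int)) : Prop := out = chunk_bits_alt bits size
instance (bits : List Int) (size : Int) (out : List (List Int)) : Decidable (Spec_chunk_bits bits size out) := by unfold Spec_chunk_bits; infer_instance

-- ===== CLAIM (what is proved, stated in full; the proofs are below) =====
def Claim_equal_chunk_bits : Prop := ∀ (bits : List Int) (size : Int), Dom_chunk_bits bits size → Pre_chunk_bits bits size → Spec_chunk_bits bits size (chunk_bits bits size)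

-- ===== LEMMAS AND PROOFS =====

-- reference chunker: take `s`, pad with zeros to length `s`, recurse on the rest
def chunksOf (s : Nat) (l : List Int) : List (List Int) :=
  if h : l = [] ∨ s = 0 then []
  else (l.take s ++ List.replicate (s - l.length) 0) :: chunksOf s (l.drop s)
termination_by l.length
decreasing_by
  rw [not_or] at h
  have h1 : l.length ≠ 0 := fun e => h.1 (List.length_eq_zero_iff.mp e)
  simp only [List.length_drop]
  omega

lemma chunksOf_nil (s : Nat) : chunksOf s [] = [] := by rw [chunksOf]; simp

lemma chunksOf_cons (s : Nat) (l : List Int) (hl : l ≠ []) (hs : s ≠ 0) :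
    chunksOf s l = (l.take s ++ List.replicate (s - l.length) 0) :: chunksOf s (l.drop s) := by
  rw [chunksOf]; simp [hl, hs]

lemma foldl_append_singleton {α β : Type} (f : α → β) (l : List α) (acc : List β) :
    l.foldl (fun acc x => acc ++ [f x]) acc = acc ++ l.map f := by
  induction l generalizing acc with
  | nil => simp
  | cons x xs ih => simp [ih]

lemma pyRange_pos_nil (a b s : Int) (hs : 0 < s) (h : b ≤ a) :
    PySem.List.pyRange a b s = [] := by
  rw [PySem.List.pyRange_of_pos a b hs]
  simp [not_lt.mpr h]

lemma pyRange_pos_cons (a b s : Int) (hs : 0 < s) (h : a < b) :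
    PySem.List.pyRange a b s = a :: PySem.List.pyRange (a + s) b s := by
  rw [PySem.List.pyRange_of_pos a b hs, PySem.List.pyRange_of_pos (a + s) b hs]
  have hc : b - a + s - 1 = (b - a - 1) + 1 * s := by ring
  have hcount : (b - a + s - 1) / s = (b - a - 1) / s + 1 := by
    rw [hc, Int.add_mul_ediv_right _ _ hs.ne']
  by_cases h2 : a + s < b
  · have hc2 : b - (a + s) + s - 1 = b - a - 1 := by ring
    have hnn : 0 ≤ (b - a - 1) / s := Int.ediv_nonneg (by omega) hs.le
    rw [if_pos h, if_pos h2, hcount, hc2]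
    rw [Int.toNat_add hnn (by omega)]
    show List.map _ (List.range (_ + 1)) = _
    rw [List.range_succ_eq_map]
    simp only [List.map_cons, List.map_map, Nat.cast_zero, mul_zero, add_zero]
    congr 1
    apply List.map_congr_left
    intro k _
    simp only [Function.comp]
    push_cast
    ring
  · have hz : (b - a - 1) / s = 0 := Int.ediv_eq_zero_of_lt (by omega) (by omega)
    rw [if_pos h, if_neg h2, hcount, hz]
    simp

lemma mapA (bits : List Int) (s : Nat) (hs : 0 < s) :
    ∀ (fuel j : Nat), bits.length - j ≤ fuel →
    (PySem.List.pyRange (j : Int) (bits.length : Int) (s : Int)).map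
      (fun i =>
        if ((PySem.List.slice bits (some i) (some (i + (s : Int)))).length : Int) < (s : Int)
        then PySem.List.slice bits (some i) (some (i + (s : Int)))
              ++ List.replicate ((s : Int) - ((PySem.List.slice bits (some i) (some (i + (s : Int)))).length : Int)).toNat 0
        else PySem.List.slice bits (some i) (some (i + (s : Int))))
    = chunksOf s (bits.drop j) := by
  intro fuel
  induction fuel with
  | zero =>
    intro j hf
    have hj : bits.length ≤ j := by omega
    rw [pyRange_pos_nil _ _ _ (by exact_mod_cast hs) (by exact_mod_cast hj),
        List.drop_of_length_le hj, chunksOf_nil]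
    simp
  | succ fuel ih =>
    intro j hf
    by_cases hj : bits.length ≤ j
    · rw [pyRange_pos_nil _ _ _ (by exact_mod_cast hs) (by exact_mod_cast hj),
          List.drop_of_length_le hj, chunksOf_nil]
      simp
    · push_neg at hj
      rw [pyRange_pos_cons _ _ _ (by exact_mod_cast hs) (by exact_mod_cast hj)]
      rw [chunksOf_cons s (bits.drop j) (by simp [List.drop_eq_nil_iff]; omega) hs.ne']
      rw [List.map_cons]
      have hslice : PySem.List.slice bits (some (j : Int)) (some ((j : Int) + (s : Int)))
          = (bits.drop j).take s := PySem.List.slice_natCast_add bits j s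
      have hlen : ((bits.drop j).take s).length = min s (bits.length - j) := by simp
      have htail : ((j : Int) + (s : Int)) = ((j + s : Nat) : Int) := by push_cast; ring
      refine List.cons_eq_cons.mpr ⟨?_, ?_⟩
      · simp only [hslice, hlen, List.length_drop]
        by_cases hlt : bits.length - j < s
        · rw [if_pos (by push_cast; omega)]
          congr 2; omega
        · rw [if_neg (by push_cast; omega)]
          have h0 : s - (bits.length - j) = 0 := by omega
          rw [h0, List.replicate_zero, List.append_nil]
      · rw [htail, ih (j + s) (by omega), List.drop_drop]

-- helpers mirroring B's fold step and finalizer (proof-only)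
def stepB (s : Nat) (st : List (List Int) × List Int) (b : Int) : List (List Int) × List Int :=
  if ((st.2 ++ [b]).length : Int) = (s : Int) then (st.1 ++ [st.2 ++ [b]], ([] : List Int)) else (st.1, st.2 ++ [b])

def finB (s : Nat) (st : List (List Int) × List Int) : List (List Int) :=
  if st.2 ≠ [] then st.1 ++ [st.2 ++ List.replicate (((s : Int) - (st.2.length : Int)).toNat) 0] else st.1

-- B's fold invariant: finalizing the accumulated state yields acc ++ chunksOf s (cur ++ l)
lemma foldB (s : Nat) (hs : 0 < s) :
    ∀ (l : List Int) (acc : List (List Int)) (cur : List Int), cur.length < s →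
    finB s (l.foldl (stepB s) (acc, cur)) = acc ++ chunksOf s (cur ++ l) := by
  intro l
  induction l with
  | nil =>
    intro acc cur hcur
    by_cases hc : cur = []
    · subst hc; simp [finB, chunksOf_nil]
    · simp only [List.foldl_nil, finB, if_pos hc, List.append_nil]
      rw [chunksOf_cons s cur hc hs.ne']
      rw [List.drop_of_length_le hcur.le, chunksOf_nil, List.take_of_length_le hcur.le]
      have ht : ((s : Int) - (cur.length : Int)).toNat = s - cur.length := by omega
      rw [ht]
  | cons b l ih =>
    intro acc cur hcur
    simp only [List.foldl_cons]
    by_cases hfull : cur.length + 1 = s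
    · have hc : ((cur.length : Int) + 1) = (s : Int) := by omega
      have hstep : stepB s (acc, cur) b = (acc ++ [cur ++ [b]], ([] : List Int)) := by
        simp [stepB, hc]
      rw [hstep, ih (acc ++ [cur ++ [b]]) [] hs]
      have hne : cur ++ b :: l ≠ [] := by simp
      rw [chunksOf_cons s (cur ++ b :: l) hne hs.ne']
      have hsplit : cur ++ b :: l = (cur ++ [b]) ++ l := by simp
      have hlenc : (cur ++ [b]).length = s := by simp; omega
      rw [hsplit, List.take_append_of_le_length (by omega),
          List.take_of_length_le (by omega),
          List.drop_append_of_le_length (by omega),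
          List.drop_of_length_le (by omega)]
      have h0 : s - ((cur ++ [b]) ++ l).length = 0 := by simp; omega
      rw [h0, List.replicate_zero, List.append_nil]
      simp
    · have hc : ¬ ((cur.length : Int) + 1) = (s : Int) := by omega
      have hstep : stepB s (acc, cur) b = (acc, cur ++ [b]) := by
        simp [stepB, hc]
      rw [hstep, ih acc (cur ++ [b]) (by simp; omega)]
      have hsplit : (cur ++ [b]) ++ l = cur ++ b :: l := by simp
      rw [hsplit]

theorem chunk_bits_spec : Claim_equal_chunk_bits := by
  intro bits size _ hpre
  unfold Spec_chunk_bits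
  have hpos : 0 < size := hpre
  obtain ⟨s, rfl⟩ : ∃ s : Nat, size = (s : Int) := ⟨size.toNat, (Int.toNat_of_nonneg hpos.le).symm⟩
  have hs : 0 < s := by exact_mod_cast hpos
  -- A side
  have hA : chunk_bits bits (s : Int) = chunksOf s bits := by
    simp only [chunk_bits]
    rw [foldl_append_singleton, List.nil_append]
    have := mapA bits s hs bits.length 0 (by omega)
    simp only [Nat.cast_zero, List.drop_zero] at this
    exact this
  -- B side
  have hB : chunk_bits_alt bits (s : Int) = chunksOf s bits := by
    show finB s (bits.foldl (stepB s) ([], [])) = chunksOf s bits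
    have h := foldB s hs bits [] [] hs
    simpa using h
  rw [hA, hB]
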